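-- pv_equiv track=rewrite | github.com/pypi-data/pypi-mirror-403 | packages/pgdsn2env/pgdsn2env-1.0.1-py3-none-any.whl/pgdsn2env/_core.py | dotenv_quote
-- ===== SOURCE A (Python) =====
-- def dotenv_quote(value: str) -> str:
--     """Quote a value for use in a .env file, escaping special characters."""
--     if value == "":
--         return '""'
--     needs_quotes = any(ch in value for ch in (" ", "\t", "\n", "\r", '"', "\\"))
--     if not needs_quotes:
--         return value
--     escaped = (
--         value.replace("\\", "\\\\")
--         .replace('"', '\\"')
--         .replace("\n", "\\n")
--         .replace("\r", "\\r")
--     )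
--     return f'"{escaped}"'
-- ===== SOURCE B (Python) =====
-- def dotenv_quote(value: str) -> str:
--     """Quote a value for use in a .env file, escaping special characters."""
--     if value == "":
--         return '""'
--     out = []
--     needs_quotes = False
--     for ch in value:
--         if ch == "\\":
--             out.append("\\\\")
--         elif ch == '"':
--             out.append('\\"')
--         elif ch == "\n":
--             out.append("\\n")
--         elif ch == "\r":
--             out.append("\\r")
--         else:
--             out.append(ch)
--         if ch in (" ", "\t", "\n", "\r", '"', "\\"):
--             needs_quotes = True
--     if not needs_quotes:
--         return value
--     return '"' + "".join(out) + '"'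
-- ===== Notes on version B (the rewrite author's own statement) =====
-- stated objective: alternative
-- what changed: Replaced the six-substring membership scan plus four sequential .replace passes with one single pass over the characters that builds the escaped output and the needs-quotes flag together; same asymptotic cost, and in CPython A's C-level replaces are faster in practice.
import Mathlib
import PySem

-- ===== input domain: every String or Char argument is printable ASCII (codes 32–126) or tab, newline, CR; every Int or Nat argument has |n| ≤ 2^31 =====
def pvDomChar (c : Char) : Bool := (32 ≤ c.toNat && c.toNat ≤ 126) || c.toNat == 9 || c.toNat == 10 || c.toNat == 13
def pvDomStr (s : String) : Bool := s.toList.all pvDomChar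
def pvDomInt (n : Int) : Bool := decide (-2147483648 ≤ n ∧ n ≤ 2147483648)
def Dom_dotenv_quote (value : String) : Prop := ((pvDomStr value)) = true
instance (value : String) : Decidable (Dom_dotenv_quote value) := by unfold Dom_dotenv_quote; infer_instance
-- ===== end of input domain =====

-- B replaces A's six-substring membership scan plus four sequential replace passes by one
-- single pass that builds the escaped output and the needs-quotes flag together (alternative decomposition).

-- ===== PORT A =====
def dotenv_quote (value : String) : String :=
  if value = "" then "\"\""
  else
    let needs_quotes :=
      [" ", "\t", "\n", "\r", "\"", "\\"].any (fun ch => PySem.Str.isIn ch value)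
    if !needs_quotes then value
    else
      let escaped :=
        PySem.Str.replace
          (PySem.Str.replace
            (PySem.Str.replace
              (PySem.Str.replace value "\\" "\\\\")
              "\"" "\\\"")
            "\n" "\\n")
          "\r" "\\r"
      -- f'"{escaped}"' : string concatenation, exact via the character list
      String.ofList ('"' :: escaped.toList ++ ['"'])

-- ===== PORT B =====
-- per-character escape of Source B's if/elif chain
def pvEscChar (c : Char) : List Char :=
  if c = '\\' then ['\\', '\\']
  else if c = '"' then ['\\', '"']
  else if c = '\n' then ['\\', 'n']
  else if c = '\r' then ['\\', 'r']
  else [c]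

-- Source B's 'ch in (" ", "\t", "\n", "\r", '"', "\\")'
def pvSpecial (c : Char) : Bool := [' ', '\t', '\n', '\r', '"', '\\'].contains c

def dotenv_quote_alt (value : String) : String :=
  if value = "" then "\"\""
  else
    let st := value.toList.foldl
      (fun (st : List Char × Bool) ch => (st.1 ++ pvEscChar ch, st.2 || pvSpecial ch))
      ([], false)
    if !st.2 then value
    else String.ofList ('"' :: st.1 ++ ['"'])

-- ===== PRECONDITION & SPEC =====
def Spec_dotenv_quote (value : String) (out : String) : Prop := out = dotenv_quote_alt value
instance (value : String) (out : String) : Decidable (Spec_dotenv_quote value out) := by unfold Spec_dotenv_quote; infer_instance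

-- ===== CLAIM (what is proved, stated in full; the proofs are below) =====
def Claim_equal_dotenv_quote : Prop := ∀ (value : String), Dom_dotenv_quote value → Spec_dotenv_quote value (dotenv_quote value)

-- ===== LEMMAS AND PROOFS =====

-- single-character pattern: replace is the per-character flatMap
lemma replace_go_single (a : Char) (new : List Char) :
    ∀ (l acc : List Char) (fuel : Nat), l.length ≤ fuel →
      PySem.Chars.replace.go [a] new fuel l acc
        = acc.reverse ++ l.flatMap (fun c => if c = a then new else [c]) := by
  intro l
  induction l with
  | nil =>
      intro acc fuel _
      cases fuel <;> simp [PySem.Chars.replace.go]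
  | cons c t ih =>
      intro acc fuel hf
      cases fuel with
      | zero => simp at hf
      | succ fuel =>
        by_cases h : c = a
        · subst h
          simp only [PySem.Chars.replace.go, List.isPrefixOf, BEq.rfl, Bool.true_and,
            if_pos, List.length_cons, List.length_nil, List.drop_succ_cons, List.drop_zero]
          rw [ih (new.reverse ++ acc) fuel (by simpa using hf)]
          simp
        · have hpre : ([a].isPrefixOf (c :: t)) = false := by
            simp [List.isPrefixOf]
            exact fun hh => absurd hh.symm h
          simp only [PySem.Chars.replace.go, hpre, Bool.false_eq_true, if_neg,
            not_false_eq_true]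
          rw [ih (c :: acc) fuel (by simpa using hf)]
          simp [h]

lemma replace_single (s : List Char) (a : Char) (new : List Char) :
    PySem.Chars.replace s [a] new = s.flatMap (fun c => if c = a then new else [c]) := by
  simpa [PySem.Chars.replace] using replace_go_single a new s [] s.length (le_refl _)

-- the four chained per-character replaces compose to pvEscChar
lemma esc_head (c : Char) :
    ((((if c = '\\' then ['\\','\\'] else [c]).flatMap
        (fun d => if d = '"' then ['\\','"'] else [d])).flatMap
        (fun d => if d = '\n' then ['\\','n'] else [d])).flatMap
        (fun d => if d = '\r' then ['\\','r'] else [d]))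
      = pvEscChar c := by
  by_cases h1 : c = '\\'
  · simp [h1, pvEscChar]
  · by_cases h2 : c = '"'
    · simp [h2, pvEscChar]
    · by_cases h3 : c = '\n'
      · simp [h3, pvEscChar]
      · by_cases h4 : c = '\r'
        · simp [h4, pvEscChar]
        · simp [h1, h2, h3, h4, pvEscChar]

lemma chain_eq (s : List Char) :
    ((((s.flatMap (fun c => if c = '\\' then ['\\','\\'] else [c])).flatMap
        (fun d => if d = '"' then ['\\','"'] else [d])).flatMap
        (fun d => if d = '\n' then ['\\','n'] else [d])).flatMap
        (fun d => if d = '\r' then ['\\','r'] else [d]))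
      = s.flatMap pvEscChar := by
  induction s with
  | nil => simp
  | cons c t ih =>
      simp only [List.flatMap_cons, List.flatMap_append, ih]
      rw [esc_head]

-- A's escaped string as a flatMap
lemma escapedA_eq (value : String) :
    (PySem.Str.replace
        (PySem.Str.replace
          (PySem.Str.replace
            (PySem.Str.replace value "\\" "\\\\")
            "\"" "\\\"")
          "\n" "\\n")
        "\r" "\\r").toList
      = value.toList.flatMap pvEscChar := by
  simp only [PySem.Str.toList_replace]
  show PySem.Chars.replace (PySem.Chars.replace (PySem.Chars.replace
    (PySem.Chars.replace value.toList ['\\'] ['\\','\\']) ['"'] ['\\','"'])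
    ['\n'] ['\\','n']) ['\r'] ['\\','r'] = _
  rw [replace_single, replace_single, replace_single, replace_single]
  exact chain_eq value.toList

-- B's fold computes the flatMap and the any-special flag
lemma foldl_inv (l : List Char) : ∀ (acc : List Char) (b : Bool),
    l.foldl (fun (st : List Char × Bool) ch => (st.1 ++ pvEscChar ch, st.2 || pvSpecial ch)) (acc, b)
      = (acc ++ l.flatMap pvEscChar, b || l.any pvSpecial) := by
  induction l with
  | nil => intro acc b; simp
  | cons c t ih =>
      intro acc b
      simp only [List.foldl_cons, ih, List.flatMap_cons, List.any_cons]
      simp [Bool.or_assoc]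

-- one-character substring test is membership
lemma isIn_single (c : Char) (l : List Char) :
    PySem.Chars.isIn [c] l = l.contains c := by
  by_cases h : c ∈ l
  · have h1 : PySem.Chars.isIn [c] l = true :=
      (PySem.Chars.isIn_iff_infix [c] l).2 ((List.singleton_infix_iff c l).2 h)
    simp [h1, List.contains_eq_mem, h]
  · have h1 : PySem.Chars.isIn [c] l = false := by
      rw [PySem.Chars.isIn_eq_false_iff]
      exact fun hi => h ((List.singleton_infix_iff c l).1 hi)
    simp [h1, List.contains_eq_mem, h]

-- A's six-substring scan equals B's per-character special flag
lemma needs_eq (value : String) :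
    ([" ", "\t", "\n", "\r", "\"", "\\"].any (fun ch => PySem.Str.isIn ch value))
      = value.toList.any pvSpecial := by
  have h : ∀ (ch : String), PySem.Str.isIn ch value = PySem.Chars.isIn ch.toList value.toList := by
    intro ch; simp [PySem.Str.isIn_eq]
  simp only [List.any_cons, List.any_nil, Bool.or_false, h]
  simp only [show (" " : String).toList = [' '] from rfl,
    show ("\t" : String).toList = ['\t'] from rfl,
    show ("\n" : String).toList = ['\n'] from rfl,
    show ("\r" : String).toList = ['\r'] from rfl,
    show ("\"" : String).toList = ['"'] from rfl,
    show ("\\" : String).toList = ['\\'] from rfl]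
  simp only [isIn_single]
  rw [Bool.eq_iff_iff]
  simp only [Bool.or_eq_true, List.contains_eq_mem, decide_eq_true_eq, List.any_eq_true]
  constructor
  · rintro (h | h | h | h | h | h) <;> exact ⟨_, h, by decide⟩
  · rintro ⟨c, hc, hcs⟩
    have hc6 : c ∈ [' ', '\t', '\n', '\r', '"', '\\'] := by
      simpa [pvSpecial, List.contains_eq_mem] using hcs
    fin_cases hc6 <;> tauto

-- ===== VERDICT (by name: the statement is the Claim_ definition above) =====
theorem dotenv_quote_spec : Claim_equal_dotenv_quote := by
  intro value _
  unfold Spec_dotenv_quote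
  by_cases hempty : value = ""
  · rw [hempty]; rfl
  · simp only [dotenv_quote, dotenv_quote_alt, hempty, if_neg, not_false_eq_true]
    rw [needs_eq, foldl_inv]
    simp only [List.nil_append, Bool.false_or]
    cases hq : value.toList.any pvSpecial with
    | false => simp
    | true =>
        simp only [Bool.not_true, Bool.false_eq_true, if_neg, not_false_eq_true]
        rw [escapedA_eq]
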